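-- pv_equiv track=rewrite | github.com/bps24/SMIF-Interview-Questions | Question 3/Logic Question.py | sum_ssmif
-- ===== SOURCE A (Python) =====
-- def sum_ssmif(nestlist):
--     lst=[]
--
--     #iterates through each list in the nested list
--     for n in range(len(nestlist)):
--
--         #condition to sort even and odd indices of lists
--         if n%2==0:
--             lst.append(calc_sum(nestlist[n],9,6,2))
--         else:
--             lst.append(calc_sum(nestlist[n],7,4,3))
--     return calc_sum(lst,4,5,0)
--
-- def calc_sum(lst, start, end, factor):
--
--     #instantiate boolean variables to keep track of when indices should be multiplied
--     occur=False
--     mult=False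
--     count=0
--
--     #iterate through every entry
--     for num in lst:
--
--         #change booleans when the start number first appears
--         if num==start and not occur:
--             mult=True
--             occur=True
--
--         #add the entry to a running count
--         if mult:
--             count+=num*factor
--         else:
--             count+=num
--
--         #change back the booleans once the end number appears
--         if num==end and occur and mult:
--             mult=False
--
--     #if end number never appears
--     if mult:
--         return sum(lst)
--
--     return count
-- ===== SOURCE B (Python) =====
-- def calc_sum(lst, start, end, factor):
--     # locate the multiplied region by index; fall back to a plain sum if absent
--     try:
--         i = lst.index(start)
--     except ValueError:
--         return sum(lst)
--     try:
--         j = lst.index(end, i)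
--     except ValueError:
--         return sum(lst)
--     return sum(num * factor if i <= k <= j else num for k, num in enumerate(lst))
--
-- def sum_ssmif(nestlist):
--     return calc_sum(
--         [calc_sum(sub, 9, 6, 2) if k % 2 == 0 else calc_sum(sub, 7, 4, 3)
--          for k, sub in enumerate(nestlist)],
--         4, 5, 0)
-- ===== Notes on version B (the rewrite author's own statement) =====
-- stated objective: simpler
-- what changed: calc_sum's boolean-flag state machine is replaced by locating the multiplied region with list.index (start, then end searched inclusively from it) and one positional pass that applies the factor between the two indices; the outer loop becomes an enumerate comprehension.
import Mathlib
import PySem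

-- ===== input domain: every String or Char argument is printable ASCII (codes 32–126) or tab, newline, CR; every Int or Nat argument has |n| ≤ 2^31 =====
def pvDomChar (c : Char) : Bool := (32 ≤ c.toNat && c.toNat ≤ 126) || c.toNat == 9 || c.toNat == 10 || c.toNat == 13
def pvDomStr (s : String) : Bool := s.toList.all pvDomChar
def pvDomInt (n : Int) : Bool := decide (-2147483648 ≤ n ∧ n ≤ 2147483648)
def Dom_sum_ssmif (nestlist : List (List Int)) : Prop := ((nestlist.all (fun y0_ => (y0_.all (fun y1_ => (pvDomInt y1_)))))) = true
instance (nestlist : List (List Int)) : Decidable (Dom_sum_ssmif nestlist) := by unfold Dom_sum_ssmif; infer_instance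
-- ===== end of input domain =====

-- B replaces A's boolean-flag state machine in calc_sum by index-locating the multiplied
-- region and one positional pass (objective: simpler; return value only, no mutation).

-- ===== PORT A =====
-- one step of A's calc_sum loop, state = (occur, mult, count)
def stepA (start end_ factor : Int) (st : Bool × Bool × Int) (num : Int) : Bool × Bool × Int :=
  let p : Bool × Bool := if num == start && !st.1 then (true, true) else (st.1, st.2.1)
  let count : Int := if p.2 then st.2.2 + num * factor else st.2.2 + num
  let mult : Bool := if num == end_ && p.1 && p.2 then false else p.2
  (p.1, mult, count)

def calcSum (lst : List Int) (start end_ factor : Int) : Int :=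
  let r := lst.foldl (stepA start end_ factor) (false, false, 0)
  if r.2.1 then lst.sum else r.2.2

def sum_ssmif (nestlist : List (List Int)) : Int :=
  let lst := (PySem.List.pyRange 0 (PySem.List.len nestlist) 1).foldl
    (fun acc n => acc ++ [if PySem.Int.mod n 2 == 0
                          then calcSum (PySem.List.pyGetD nestlist n []) 9 6 2
                          else calcSum (PySem.List.pyGetD nestlist n []) 7 4 3]) []
  calcSum lst 4 5 0

-- ===== PORT B =====
-- lst.index(end, i) is ported as index? on lst.drop i, j = i + relative index (exact)
def calcSumAlt (lst : List Int) (start end_ factor : Int) : Int :=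
  match PySem.List.index? lst start with
  | none => lst.sum
  | some i =>
    match PySem.List.index? (lst.drop i) end_ with
    | none => lst.sum
    | some dj =>
      let j : Int := (i : Int) + (dj : Int)
      ((PySem.List.enumerate lst 0).map
        (fun kv => if (i : Int) ≤ kv.1 ∧ kv.1 ≤ j then kv.2 * factor else kv.2)).sum

def sum_ssmif_alt (nestlist : List (List Int)) : Int :=
  calcSumAlt ((PySem.List.enumerate nestlist 0).map
    (fun kv => if PySem.Int.mod kv.1 2 == 0
               then calcSumAlt kv.2 9 6 2
               else calcSumAlt kv.2 7 4 3)) 4 5 0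

-- ===== PRECONDITION & SPEC =====
def Spec_sum_ssmif (nestlist : List (List Int)) (out : Int) : Prop := out = sum_ssmif_alt nestlist
instance (nestlist : List (List Int)) (out : Int) : Decidable (Spec_sum_ssmif nestlist out) := by unfold Spec_sum_ssmif; infer_instance

-- ===== CLAIM (what is proved, stated in full; the proofs are below) =====
def Claim_equal_sum_ssmif : Prop := ∀ (nestlist : List (List Int)), Dom_sum_ssmif nestlist → Spec_sum_ssmif nestlist (sum_ssmif nestlist)

-- ===== LEMMAS AND PROOFS =====

-- done phase: occur, ¬mult — everything is added plainly
theorem foldl_stepA_done (s e f : Int) (l : List Int) (c : Int) :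
    l.foldl (stepA s e f) (true, false, c) = (true, false, c + l.sum) := by
  induction l generalizing c with
  | nil => simp
  | cons x xs ih => simp [stepA, ih]; ring_nf

-- multiplying phase: ends at the first occurrence of e
theorem foldl_stepA_mult (s e f : Int) (l : List Int) (c : Int) :
    l.foldl (stepA s e f) (true, true, c) =
      match PySem.List.index? l e with
      | none => (true, true, c + l.sum * f)
      | some j => (true, false, c + (l.take (j+1)).sum * f + (l.drop (j+1)).sum) := by
  induction l generalizing c with
  | nil => simp
  | cons x xs ih =>
    by_cases hx : x = e
    · subst hx
      rw [PySem.List.index?_cons_self]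
      simp only [List.foldl_cons]
      have h1 : stepA s x f (true, true, c) x = (true, false, c + x * f) := by simp [stepA]
      rw [h1, foldl_stepA_done]
      simp only [List.take_succ_cons, List.take_zero, List.drop_succ_cons, List.drop_zero,
        List.sum_cons, List.sum_nil, Prod.mk.injEq, true_and]
      ring_nf
    · rw [PySem.List.index?_cons_of_ne xs hx]
      have hstep : List.foldl (stepA s e f) (true, true, c) (x :: xs)
          = List.foldl (stepA s e f) (true, true, c + x * f) xs := by
        simp [stepA, hx]
      rw [hstep, ih]
      cases h : PySem.List.index? xs e with
      | none => simp; ring_nf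
      | some j => simp [List.take_succ_cons, List.drop_succ_cons]; ring_nf

-- initial phase: up to the first occurrence of s everything is plain, then the mult phase starts AT it
theorem foldl_stepA_init (s e f : Int) (l : List Int) (c : Int) :
    l.foldl (stepA s e f) (false, false, c) =
      match PySem.List.index? l s with
      | none => (false, false, c + l.sum)
      | some i => (l.drop i).foldl (stepA s e f) (true, true, c + (l.take i).sum) := by
  induction l generalizing c with
  | nil => simp
  | cons x xs ih =>
    by_cases hx : x = s
    · subst hx
      rw [PySem.List.index?_cons_self]
      have hstep : stepA x e f (false, false, c) x = stepA x e f (true, true, c) x := by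
        simp [stepA]
      simp only [List.foldl_cons, hstep, List.drop_zero, List.take_zero, List.sum_nil, add_zero]
    · rw [PySem.List.index?_cons_of_ne xs hx]
      have hstep : List.foldl (stepA s e f) (false, false, c) (x :: xs)
          = List.foldl (stepA s e f) (false, false, c + x) xs := by
        simp [stepA, hx]
      rw [hstep, ih]
      cases h : PySem.List.index? xs s with
      | none => simp; ring_nf
      | some i => simp [List.take_succ_cons, List.drop_succ_cons]; ring_nf

-- the positional pass of B, evaluated piecewise
theorem enum_sum_pieces (lst : List Int) (i dj : Nat) (f : Int)
    (hi : i ≤ lst.length) (hdj : dj + 1 ≤ (lst.drop i).length) :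
    ((PySem.List.enumerate lst 0).map
        (fun kv => if (i : Int) ≤ kv.1 ∧ kv.1 ≤ (i : Int) + (dj : Int) then kv.2 * f else kv.2)).sum
    = (lst.take i).sum + ((lst.drop i).take (dj+1)).sum * f + ((lst.drop i).drop (dj+1)).sum := by
  have hdecomp : lst = lst.take i ++ ((lst.drop i).take (dj+1) ++ (lst.drop i).drop (dj+1)) := by
    rw [List.take_append_drop, List.take_append_drop]
  set A := lst.take i with hA
  set B := (lst.drop i).take (dj+1) with hB
  set C := (lst.drop i).drop (dj+1) with hC
  have hlA : A.length = i := by rw [hA, List.length_take]; omega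
  have hlB : B.length = dj + 1 := by rw [hB, List.length_take]; omega
  conv_lhs => rw [hdecomp]
  rw [PySem.List.enumerate_append, PySem.List.enumerate_append, List.map_append, List.map_append,
      List.sum_append, List.sum_append]
  have hAeq : ((PySem.List.enumerate A 0).map
      (fun kv => if (i : Int) ≤ kv.1 ∧ kv.1 ≤ (i : Int) + (dj : Int) then kv.2 * f else kv.2)).sum
      = A.sum := by
    have hcong : ∀ p ∈ PySem.List.enumerate A 0,
        (if (i : Int) ≤ p.1 ∧ p.1 ≤ (i : Int) + (dj : Int) then p.2 * f else p.2) = p.2 := by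
      intro p hp
      rcases (PySem.List.mem_enumerate_iff A 0 p).1 hp with ⟨k, hk, rfl⟩
      rw [if_neg (by rw [hlA] at hk; push_cast; omega)]
    rw [List.map_congr_left hcong, PySem.List.map_snd_enumerate]
  have hBeq : ((PySem.List.enumerate B (0 + (A.length : Int))).map
      (fun kv => if (i : Int) ≤ kv.1 ∧ kv.1 ≤ (i : Int) + (dj : Int) then kv.2 * f else kv.2)).sum
      = B.sum * f := by
    have hcong : ∀ p ∈ PySem.List.enumerate B (0 + (A.length : Int)),
        (if (i : Int) ≤ p.1 ∧ p.1 ≤ (i : Int) + (dj : Int) then p.2 * f else p.2) = p.2 * f := by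
      intro p hp
      rcases (PySem.List.mem_enumerate_iff B _ p).1 hp with ⟨k, hk, rfl⟩
      rw [if_pos (by rw [hlB] at hk; rw [hlA]; push_cast at *; constructor <;> omega)]
    rw [List.map_congr_left hcong,
        List.sum_map_mul_right (PySem.List.enumerate B (0 + (A.length : Int))) (fun p => p.2) f,
        PySem.List.map_snd_enumerate]
  have hCeq : ((PySem.List.enumerate C (0 + (A.length : Int) + (B.length : Int))).map
      (fun kv => if (i : Int) ≤ kv.1 ∧ kv.1 ≤ (i : Int) + (dj : Int) then kv.2 * f else kv.2)).sum
      = C.sum := by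
    have hcong : ∀ p ∈ PySem.List.enumerate C (0 + (A.length : Int) + (B.length : Int)),
        (if (i : Int) ≤ p.1 ∧ p.1 ≤ (i : Int) + (dj : Int) then p.2 * f else p.2) = p.2 := by
      intro p hp
      rcases (PySem.List.mem_enumerate_iff C _ p).1 hp with ⟨k, hk, rfl⟩
      rw [if_neg (by rw [hlA, hlB]; push_cast; omega)]
    rw [List.map_congr_left hcong, PySem.List.map_snd_enumerate]
  rw [hAeq, hBeq, hCeq]
  ring_nf

-- A's calc_sum equals B's calc_sum on every input
theorem calcSum_eq_alt (lst : List Int) (s e f : Int) :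
    calcSum lst s e f = calcSumAlt lst s e f := by
  unfold calcSum calcSumAlt
  rw [foldl_stepA_init]
  cases hs : PySem.List.index? lst s with
  | none => simp
  | some i =>
    dsimp only
    rw [foldl_stepA_mult]
    cases he : PySem.List.index? (lst.drop i) e with
    | none => simp
    | some dj =>
      dsimp only
      obtain ⟨hi, -, -⟩ := PySem.List.getElem_of_index?_eq_some hs
      obtain ⟨hdj, -, -⟩ := PySem.List.getElem_of_index?_eq_some he
      rw [enum_sum_pieces lst i dj f (le_of_lt hi) (by omega)]
      simp

-- ===== VERDICT (by name: the statement is the Claim_ definition above) =====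
theorem sum_ssmif_spec : Claim_equal_sum_ssmif := by
  intro nestlist _
  unfold Spec_sum_ssmif sum_ssmif sum_ssmif_alt
  rw [PySem.List.foldl_append_singleton_eq_map,
      PySem.List.enumerate_eq_map_pyRange nestlist ([] : List Int), List.map_map,
      PySem.List.len_eq]
  rw [calcSum_eq_alt]
  congr 1
  apply List.map_congr_left
  intro n _
  simp only [Function.comp]
  split <;> rw [calcSum_eq_alt]
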